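-- pv_equiv track=rewrite | github.com/clemkoa/hashcode-2019 | main.py | find_index_best_pair
-- ===== SOURCE A (Python) =====
-- def get_keywords(photo, lines):
--     if len(photo) == 2:
--         return lines[photo[0]][1].union(lines[photo[1]][1])
--     return lines[photo[0]][1]
--
-- def pair_score(photo1, photo2, lines):
--     keywords1 = get_keywords(photo1, lines)
--     keywords2 = get_keywords(photo2, lines)
--     num_inter = len(keywords1.intersection(keywords2))
--     num_1_minus_2 = len(keywords1.difference(keywords2))
--     num_2_minus_1 = len(keywords2.difference(keywords1))
--     return min(num_inter, num_1_minus_2, num_2_minus_1)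
--
-- def find_index_best_pair(photo, photos, lines):
--     lim = 100
--     if len(photos) < lim:
--         return 0
--     for i in range(lim):
--         if pair_score(photo, photos[i], lines) > 2:
--             return i
--     for i in range(lim):
--         if pair_score(photo, photos[i], lines) > 0:
--             return i
--     return 0
-- ===== SOURCE B (Python) =====
-- def get_keywords(photo, lines):
--     if len(photo) == 2:
--         return lines[photo[0]][1].union(lines[photo[1]][1])
--     return lines[photo[0]][1]
--
-- def pair_score(photo1, photo2, lines):
--     keywords1 = get_keywords(photo1, lines)
--     keywords2 = get_keywords(photo2, lines)
--     num_inter = len(keywords1.intersection(keywords2))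
--     num_1_minus_2 = len(keywords1.difference(keywords2))
--     num_2_minus_1 = len(keywords2.difference(keywords1))
--     return min(num_inter, num_1_minus_2, num_2_minus_1)
--
-- def find_index_best_pair(photo, photos, lines):
--     lim = 100
--     if len(photos) < lim:
--         return 0
--     fallback = None
--     for i in range(lim):
--         s = pair_score(photo, photos[i], lines)
--         if s > 2:
--             return i
--         if fallback is None and s > 0:
--             fallback = i
--     return fallback if fallback is not None else 0
-- ===== Notes on version B (the rewrite author's own statement) =====
-- stated objective: alternative
-- what changed: B fuses A's two sequential scans over range(100) into a single loop that computes each pair_score once, returning immediately on the first score > 2 and remembering the first score > 0 index as a fallback.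
import Mathlib
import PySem

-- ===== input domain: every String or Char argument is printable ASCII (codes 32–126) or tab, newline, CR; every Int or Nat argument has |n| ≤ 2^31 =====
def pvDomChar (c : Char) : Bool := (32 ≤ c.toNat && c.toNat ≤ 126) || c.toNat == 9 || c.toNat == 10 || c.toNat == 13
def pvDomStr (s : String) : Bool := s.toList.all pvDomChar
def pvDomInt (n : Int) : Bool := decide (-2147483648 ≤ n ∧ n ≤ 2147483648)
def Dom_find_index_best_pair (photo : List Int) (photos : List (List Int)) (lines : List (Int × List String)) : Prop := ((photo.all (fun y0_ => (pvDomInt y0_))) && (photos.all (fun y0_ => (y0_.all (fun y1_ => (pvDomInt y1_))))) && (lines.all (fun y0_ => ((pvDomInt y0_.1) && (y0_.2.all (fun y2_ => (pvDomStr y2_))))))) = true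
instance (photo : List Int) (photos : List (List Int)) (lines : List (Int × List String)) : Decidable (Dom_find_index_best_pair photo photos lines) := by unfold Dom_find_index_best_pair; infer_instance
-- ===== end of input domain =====

-- B fuses A's two sequential scans of range(100) into one pass with a fallback index,
-- computing each pair_score once per index (objective: alternative decomposition; return value unchanged).

-- ===== PORT A =====
-- shared module helpers (get_keywords, pair_score), transliterated once and used by both ports
def pvGetKeywords (photo : List Int) (lines : List (Int × List String)) : List String :=
  if photo.length = 2 then
    PySem.Set.union
      (PySem.List.pyGetD lines (PySem.List.pyGetD photo 0 0) ((0 : Int), ([] : List String))).2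
      (PySem.List.pyGetD lines (PySem.List.pyGetD photo 1 0) ((0 : Int), ([] : List String))).2
  else
    (PySem.List.pyGetD lines (PySem.List.pyGetD photo 0 0) ((0 : Int), ([] : List String))).2

def pvPairScore (photo1 photo2 : List Int) (lines : List (Int × List String)) : Int :=
  let keywords1 := pvGetKeywords photo1 lines
  let keywords2 := pvGetKeywords photo2 lines
  let num_inter : Int := (PySem.Set.inter keywords1 keywords2).length
  let num_1_minus_2 : Int := (PySem.Set.diff keywords1 keywords2).length
  let num_2_minus_1 : Int := (PySem.Set.diff keywords2 keywords1).length
  min (min num_inter num_1_minus_2) num_2_minus_1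

-- A's first 'for i in range(lim)' scan: first i with pair_score > 2
def pvLoop1 (photo : List Int) (photos : List (List Int)) (lines : List (Int × List String)) : List Int → Option Int
  | [] => none
  | i :: rest =>
    if pvPairScore photo (PySem.List.pyGetD photos i []) lines > 2 then some i
    else pvLoop1 photo photos lines rest

-- A's second 'for i in range(lim)' scan: first i with pair_score > 0
def pvLoop2 (photo : List Int) (photos : List (List Int)) (lines : List (Int × List String)) : List Int → Option Int
  | [] => none
  | i :: rest =>
    if pvPairScore photo (PySem.List.pyGetD photos i []) lines > 0 then some i
    else pvLoop2 photo photos lines rest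

def find_index_best_pair (photo : List Int) (photos : List (List Int)) (lines : List (Int × List String)) : Int :=
  let lim : Int := 100
  if (photos.length : Int) < lim then 0
  else
    match pvLoop1 photo photos lines (PySem.List.pyRange 0 lim 1) with
    | some i => i
    | none =>
      match pvLoop2 photo photos lines (PySem.List.pyRange 0 lim 1) with
      | some i => i
      | none => 0

-- ===== PORT B =====
-- B's single fused loop carrying the fallback state
def pvLoopB (photo : List Int) (photos : List (List Int)) (lines : List (Int × List String)) : List Int → Option Int → Int
  | [], fallback => fallback.getD 0
  | i :: rest, fallback =>
    let s := pvPairScore photo (PySem.List.pyGetD photos i []) lines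
    if s > 2 then i
    else pvLoopB photo photos lines rest (if fallback = none ∧ s > 0 then some i else fallback)

def find_index_best_pair_alt (photo : List Int) (photos : List (List Int)) (lines : List (Int × List String)) : Int :=
  let lim : Int := 100
  if (photos.length : Int) < lim then 0
  else pvLoopB photo photos lines (PySem.List.pyRange 0 lim 1) none

-- ===== PRECONDITION & SPEC =====
-- Python indexes lines[photo[0]] (and lines[photo[1]] when len(photo)==2): valid iff photo nonempty and indices in range
def pvOkPhoto (lines : List (Int × List String)) : List Int → Bool
  | [] => false
  | a :: rest =>
    decide (PySem.Raise.InRange lines.length a) &&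
      (rest.length ≠ 1 || decide (PySem.Raise.InRange lines.length (rest.headD 0)))

-- Pre_ excludes exactly the inputs where Python A raises IndexError (empty photo rows or line indices
-- out of range), reached only when len(photos) ≥ 100; it conservatively requires validity of all 100
-- scanned rows (a closed-form bound, not a re-simulation of which rows the loop reaches before returning).
def Pre_find_index_best_pair (photo : List Int) (photos : List (List Int)) (lines : List (Int × List String)) : Prop :=
  (100 : Int) ≤ photos.length →
    (pvOkPhoto lines photo = true ∧ ∀ p ∈ photos.take 100, pvOkPhoto lines p = true)
instance (photo : List Int) (photos : List (List Int)) (lines : List (Int × List String)) : Decidable (Pre_find_index_best_pair photo photos lines) := by unfold Pre_find_index_best_pair; infer_instance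

def pvWitness_find_index_best_pair : List Int × List (List Int) × (List (Int × List String)) :=
  ([0], [[0]], [(0, ["cat"])])

def Spec_find_index_best_pair (photo : List Int) (photos : List (List Int)) (lines : List (Int × List String)) (out : Int) : Prop := out = find_index_best_pair_alt photo photos lines
instance (photo : List Int) (photos : List (List Int)) (lines : List (Int × List String)) (out : Int) : Decidable (Spec_find_index_best_pair photo photos lines out) := by unfold Spec_find_index_best_pair; infer_instance

-- ===== CLAIM (what is proved, stated in full; the proofs are below) =====
def Claim_equal_find_index_best_pair : Prop := ∀ (photo : List Int) (photos : List (List Int)) (lines : List (Int × List String)), Dom_find_index_best_pair photo photos lines → Pre_find_index_best_pair photo photos lines → Spec_find_index_best_pair photo photos lines (find_index_best_pair photo photos lines)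

-- ===== LEMMAS AND PROOFS =====
-- Loop fusion: B's single pass with fallback equals A's two sequential scans.
theorem pvLoopB_eq (photo : List Int) (photos : List (List Int)) (lines : List (Int × List String))
    (l : List Int) (fb : Option Int) :
    pvLoopB photo photos lines l fb =
      match pvLoop1 photo photos lines l with
      | some i => i
      | none =>
        match fb with
        | some j => j
        | none =>
          match pvLoop2 photo photos lines l with
          | some i => i
          | none => 0 := by
  induction l generalizing fb with
  | nil => cases fb <;> simp [pvLoopB, pvLoop1, pvLoop2, Option.getD]
  | cons i rest ih =>
    simp only [pvLoopB, pvLoop1, pvLoop2]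
    by_cases h2 : pvPairScore photo (PySem.List.pyGetD photos i []) lines > 2
    · simp [h2]
    · have h2' : ¬ pvPairScore photo (PySem.List.pyGetD photos i []) lines > 2 := h2
      simp only [if_neg h2']
      rw [ih]
      by_cases h0 : pvPairScore photo (PySem.List.pyGetD photos i []) lines > 0
      · cases fb <;> simp [h0]
      · cases fb <;> simp [h0]

theorem find_index_best_pair_eq_alt (photo : List Int) (photos : List (List Int))
    (lines : List (Int × List String)) :
    find_index_best_pair photo photos lines = find_index_best_pair_alt photo photos lines := by
  unfold find_index_best_pair find_index_best_pair_alt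
  by_cases h : (photos.length : Int) < 100
  · simp [h]
  · simp only [if_neg h]
    rw [pvLoopB_eq]

-- ===== VERDICT (by name: the statement is the Claim_ definition above) =====
theorem find_index_best_pair_spec : Claim_equal_find_index_best_pair := by
  intro photo photos lines _ _
  unfold Spec_find_index_best_pair
  exact find_index_best_pair_eq_alt photo photos lines
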